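-- pv_equiv track=rewrite | github.com/freeacc135531-create/L4D-CFG-Manager | src/core/cfg_stats.py | get_cfg_stats
-- ===== SOURCE A (Python) =====
-- def get_cfg_stats(cfg_data):
--
--     stats = {
--         "total_commands": 0,
--         "network": 0,
--         "input": 0,
--         "audio": 0,
--         "graphics": 0,
--         "other": 0
--     }
--
--     network_cmds = {
--         "rate", "cl_cmdrate", "cl_updaterate",
--         "cl_interp", "cl_interp_ratio"
--     }
--
--     input_cmds = {
--         "sensitivity", "m_rawinput", "m_filter"
--     }
--
--     audio_cmds = {
--         "volume", "snd_mixahead"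
--     }
--
--     graphics_cmds = {
--         "fps_max", "mat_queue_mode", "cl_forcepreload"
--     }
--
--     for cmd in cfg_data:
--
--         stats["total_commands"] += 1
--
--         if cmd in network_cmds:
--             stats["network"] += 1
--
--         elif cmd in input_cmds:
--             stats["input"] += 1
--
--         elif cmd in audio_cmds:
--             stats["audio"] += 1
--
--         elif cmd in graphics_cmds:
--             stats["graphics"] += 1
--
--         else:
--             stats["other"] += 1
--
--     return stats
-- ===== SOURCE B (Python) =====
-- NETWORK = ("rate", "cl_cmdrate", "cl_updaterate", "cl_interp", "cl_interp_ratio")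
-- INPUT = ("sensitivity", "m_rawinput", "m_filter")
-- AUDIO = ("volume", "snd_mixahead")
-- GRAPHICS = ("fps_max", "mat_queue_mode", "cl_forcepreload")
--
--
-- def get_cfg_stats(cfg_data):
--     # Staged counting: one count-scan per known command, 'other' by subtraction.
--     # Correct because the four category command tuples are pairwise disjoint.
--     total = len(cfg_data)
--     network = sum(cfg_data.count(c) for c in NETWORK)
--     inp = sum(cfg_data.count(c) for c in INPUT)
--     audio = sum(cfg_data.count(c) for c in AUDIO)
--     graphics = sum(cfg_data.count(c) for c in GRAPHICS)
--     return {
--         "total_commands": total,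
--         "network": network,
--         "input": inp,
--         "audio": audio,
--         "graphics": graphics,
--         "other": total - network - inp - audio - graphics,
--     }
-- ===== Notes on version B (the rewrite author's own statement) =====
-- stated objective: alternative
-- what changed: Instead of classifying each element in one loop with an if/elif cascade, B takes the total with len(), computes each category as a sum of cfg_data.count(c) scans over that category's commands, and derives 'other' by subtraction (valid because the category sets are disjoint); there is no per-element dispatch at all.
import Mathlib
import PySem

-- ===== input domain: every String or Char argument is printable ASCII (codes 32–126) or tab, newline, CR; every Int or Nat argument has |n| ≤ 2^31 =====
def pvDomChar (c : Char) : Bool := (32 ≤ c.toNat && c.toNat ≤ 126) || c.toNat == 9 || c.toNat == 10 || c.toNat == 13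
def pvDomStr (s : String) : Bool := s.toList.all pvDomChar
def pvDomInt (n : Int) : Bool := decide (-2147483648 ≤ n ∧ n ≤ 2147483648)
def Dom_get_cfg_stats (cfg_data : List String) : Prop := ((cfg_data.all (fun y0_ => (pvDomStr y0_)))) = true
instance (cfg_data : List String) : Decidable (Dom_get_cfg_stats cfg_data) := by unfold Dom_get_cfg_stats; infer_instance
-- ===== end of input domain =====

-- B replaces A's single classify-each-element loop by staged counting: the total via
-- length, each category as a sum of per-command count scans, and 'other' by
-- subtraction (the category sets are disjoint). Alternative decomposition, same cost.

-- ===== PORT A =====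
def get_cfg_stats (cfg_data : List String) : List (String × Int) :=
  let stats : PySem.Dict String Int := PySem.Dict.mk
    [("total_commands", (0 : Int)), ("network", 0), ("input", 0),
     ("audio", 0), ("graphics", 0), ("other", 0)]
  let network_cmds : PySem.Set String := PySem.Set.ofList ["rate", "cl_cmdrate", "cl_updaterate", "cl_interp", "cl_interp_ratio"]
  let input_cmds : PySem.Set String := PySem.Set.ofList ["sensitivity", "m_rawinput", "m_filter"]
  let audio_cmds : PySem.Set String := PySem.Set.ofList ["volume", "snd_mixahead"]
  let graphics_cmds : PySem.Set String := PySem.Set.ofList ["fps_max", "mat_queue_mode", "cl_forcepreload"]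
  cfg_data.foldl (fun stats cmd =>
    let stats := PySem.Dict.modify stats "total_commands" 0 (· + 1)
    if PySem.Set.contains network_cmds cmd then
      PySem.Dict.modify stats "network" 0 (· + 1)
    else if PySem.Set.contains input_cmds cmd then
      PySem.Dict.modify stats "input" 0 (· + 1)
    else if PySem.Set.contains audio_cmds cmd then
      PySem.Dict.modify stats "audio" 0 (· + 1)
    else if PySem.Set.contains graphics_cmds cmd then
      PySem.Dict.modify stats "graphics" 0 (· + 1)
    else
      PySem.Dict.modify stats "other" 0 (· + 1)) stats |>.items

-- ===== PORT B =====
-- total = len(cfg_data); each category = sum(cfg_data.count(c) for c in CATEGORY);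
-- other = total minus the four category sums.
def get_cfg_stats_alt (cfg_data : List String) : List (String × Int) :=
  let total : Int := cfg_data.length
  let network : Int := (["rate", "cl_cmdrate", "cl_updaterate", "cl_interp", "cl_interp_ratio"].map (fun c => (PySem.List.count cfg_data c : Int))).sum
  let inp : Int := (["sensitivity", "m_rawinput", "m_filter"].map (fun c => (PySem.List.count cfg_data c : Int))).sum
  let audio : Int := (["volume", "snd_mixahead"].map (fun c => (PySem.List.count cfg_data c : Int))).sum
  let graphics : Int := (["fps_max", "mat_queue_mode", "cl_forcepreload"].map (fun c => (PySem.List.count cfg_data c : Int))).sum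
  [("total_commands", total), ("network", network), ("input", inp),
   ("audio", audio), ("graphics", graphics),
   ("other", total - network - inp - audio - graphics)]

-- ===== PRECONDITION & SPEC =====
def Spec_get_cfg_stats (cfg_data : List String) (out : List (String × Int)) : Prop := out = get_cfg_stats_alt cfg_data
instance (cfg_data : List String) (out : List (String × Int)) : Decidable (Spec_get_cfg_stats cfg_data out) := by unfold Spec_get_cfg_stats; infer_instance

-- ===== CLAIM (what is proved, stated in full; the proofs are below) =====
def Claim_equal_get_cfg_stats : Prop := ∀ (cfg_data : List String), Dom_get_cfg_stats cfg_data → Spec_get_cfg_stats cfg_data (get_cfg_stats cfg_data)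

-- ===== LEMMAS AND PROOFS =====

-- the stats dict with its six fixed keys
def pvD (t n i a g o : Int) : PySem.Dict String Int :=
  PySem.Dict.mk
    [("total_commands", t), ("network", n), ("input", i),
     ("audio", a), ("graphics", g), ("other", o)]

-- A's loop body
def pvStep (stats : PySem.Dict String Int) (cmd : String) : PySem.Dict String Int :=
  let stats := PySem.Dict.modify stats "total_commands" 0 (· + 1)
  if PySem.Set.contains (PySem.Set.ofList ["rate", "cl_cmdrate", "cl_updaterate", "cl_interp", "cl_interp_ratio"]) cmd then
    PySem.Dict.modify stats "network" 0 (· + 1)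
  else if PySem.Set.contains (PySem.Set.ofList ["sensitivity", "m_rawinput", "m_filter"]) cmd then
    PySem.Dict.modify stats "input" 0 (· + 1)
  else if PySem.Set.contains (PySem.Set.ofList ["volume", "snd_mixahead"]) cmd then
    PySem.Dict.modify stats "audio" 0 (· + 1)
  else if PySem.Set.contains (PySem.Set.ofList ["fps_max", "mat_queue_mode", "cl_forcepreload"]) cmd then
    PySem.Dict.modify stats "graphics" 0 (· + 1)
  else
    PySem.Dict.modify stats "other" 0 (· + 1)

-- B's four category sums
def pvNB (l : List String) : Int := (["rate", "cl_cmdrate", "cl_updaterate", "cl_interp", "cl_interp_ratio"].map (fun c => (PySem.List.count l c : Int))).sum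
def pvIB (l : List String) : Int := (["sensitivity", "m_rawinput", "m_filter"].map (fun c => (PySem.List.count l c : Int))).sum
def pvAB (l : List String) : Int := (["volume", "snd_mixahead"].map (fun c => (PySem.List.count l c : Int))).sum
def pvGB (l : List String) : Int := (["fps_max", "mat_queue_mode", "cl_forcepreload"].map (fun c => (PySem.List.count l c : Int))).sum

theorem pvD_congr {a1 a2 a3 a4 a5 a6 b1 b2 b3 b4 b5 b6 : Int}
    (h1 : a1 = b1) (h2 : a2 = b2) (h3 : a3 = b3) (h4 : a4 = b4) (h5 : a5 = b5)
    (h6 : a6 = b6) : pvD a1 a2 a3 a4 a5 a6 = pvD b1 b2 b3 b4 b5 b6 := by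
  subst h1 h2 h3 h4 h5 h6; rfl


theorem pvNB_cons_rate (xs : List String) : pvNB ("rate" :: xs) = pvNB xs + 1 := by
  simp [pvNB, PySem.List.count_eq, List.count_cons]
  try ring

theorem pvNB_cons_cl_cmdrate (xs : List String) : pvNB ("cl_cmdrate" :: xs) = pvNB xs + 1 := by
  simp [pvNB, PySem.List.count_eq, List.count_cons]
  try ring

theorem pvNB_cons_cl_updaterate (xs : List String) : pvNB ("cl_updaterate" :: xs) = pvNB xs + 1 := by
  simp [pvNB, PySem.List.count_eq, List.count_cons]
  try ring

theorem pvNB_cons_cl_interp (xs : List String) : pvNB ("cl_interp" :: xs) = pvNB xs + 1 := by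
  simp [pvNB, PySem.List.count_eq, List.count_cons]
  try ring

theorem pvNB_cons_cl_interp_ratio (xs : List String) : pvNB ("cl_interp_ratio" :: xs) = pvNB xs + 1 := by
  simp [pvNB, PySem.List.count_eq, List.count_cons]
  try ring

theorem pvIB_cons_sensitivity (xs : List String) : pvIB ("sensitivity" :: xs) = pvIB xs + 1 := by
  simp [pvIB, PySem.List.count_eq, List.count_cons]
  try ring

theorem pvIB_cons_m_rawinput (xs : List String) : pvIB ("m_rawinput" :: xs) = pvIB xs + 1 := by
  simp [pvIB, PySem.List.count_eq, List.count_cons]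
  try ring

theorem pvIB_cons_m_filter (xs : List String) : pvIB ("m_filter" :: xs) = pvIB xs + 1 := by
  simp [pvIB, PySem.List.count_eq, List.count_cons]
  try ring

theorem pvAB_cons_volume (xs : List String) : pvAB ("volume" :: xs) = pvAB xs + 1 := by
  simp [pvAB, PySem.List.count_eq, List.count_cons]
  try ring

theorem pvAB_cons_snd_mixahead (xs : List String) : pvAB ("snd_mixahead" :: xs) = pvAB xs + 1 := by
  simp [pvAB, PySem.List.count_eq, List.count_cons]
  try ring

theorem pvGB_cons_fps_max (xs : List String) : pvGB ("fps_max" :: xs) = pvGB xs + 1 := by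
  simp [pvGB, PySem.List.count_eq, List.count_cons]
  try ring

theorem pvGB_cons_mat_queue_mode (xs : List String) : pvGB ("mat_queue_mode" :: xs) = pvGB xs + 1 := by
  simp [pvGB, PySem.List.count_eq, List.count_cons]
  try ring

theorem pvGB_cons_cl_forcepreload (xs : List String) : pvGB ("cl_forcepreload" :: xs) = pvGB xs + 1 := by
  simp [pvGB, PySem.List.count_eq, List.count_cons]
  try ring

theorem pvNB_cons_ne (x : String) (xs : List String) (h1 : x ≠ "rate") (h2 : x ≠ "cl_cmdrate") (h3 : x ≠ "cl_updaterate") (h4 : x ≠ "cl_interp") (h5 : x ≠ "cl_interp_ratio") :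
    pvNB (x :: xs) = pvNB xs := by
  simp [pvNB, PySem.List.count_eq, List.count_cons, h1, h2, h3, h4, h5]

theorem pvIB_cons_ne (x : String) (xs : List String) (h1 : x ≠ "sensitivity") (h2 : x ≠ "m_rawinput") (h3 : x ≠ "m_filter") :
    pvIB (x :: xs) = pvIB xs := by
  simp [pvIB, PySem.List.count_eq, List.count_cons, h1, h2, h3]

theorem pvAB_cons_ne (x : String) (xs : List String) (h1 : x ≠ "volume") (h2 : x ≠ "snd_mixahead") :
    pvAB (x :: xs) = pvAB xs := by
  simp [pvAB, PySem.List.count_eq, List.count_cons, h1, h2]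

theorem pvGB_cons_ne (x : String) (xs : List String) (h1 : x ≠ "fps_max") (h2 : x ≠ "mat_queue_mode") (h3 : x ≠ "cl_forcepreload") :
    pvGB (x :: xs) = pvGB xs := by
  simp [pvGB, PySem.List.count_eq, List.count_cons, h1, h2, h3]

theorem pvStep_other (t n i a g o : Int) (x : String) (h1 : x ≠ "rate") (h2 : x ≠ "cl_cmdrate") (h3 : x ≠ "cl_updaterate") (h4 : x ≠ "cl_interp") (h5 : x ≠ "cl_interp_ratio") (h6 : x ≠ "sensitivity") (h7 : x ≠ "m_rawinput") (h8 : x ≠ "m_filter") (h9 : x ≠ "volume") (h10 : x ≠ "snd_mixahead") (h11 : x ≠ "fps_max") (h12 : x ≠ "mat_queue_mode") (h13 : x ≠ "cl_forcepreload") :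
    pvStep (pvD t n i a g o) x = pvD (t + 1) n i a g (o + 1) := by
  have hn : PySem.Set.contains (PySem.Set.ofList ["rate", "cl_cmdrate", "cl_updaterate", "cl_interp", "cl_interp_ratio"]) x = false := by
    simp [PySem.Set.contains, PySem.Set.ofList, h1, h2, h3, h4, h5]
  have hi : PySem.Set.contains (PySem.Set.ofList ["sensitivity", "m_rawinput", "m_filter"]) x = false := by
    simp [PySem.Set.contains, PySem.Set.ofList, h6, h7, h8]
  have ha : PySem.Set.contains (PySem.Set.ofList ["volume", "snd_mixahead"]) x = false := by
    simp [PySem.Set.contains, PySem.Set.ofList, h9, h10]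
  have hg : PySem.Set.contains (PySem.Set.ofList ["fps_max", "mat_queue_mode", "cl_forcepreload"]) x = false := by
    simp [PySem.Set.contains, PySem.Set.ofList, h11, h12, h13]
  simp only [pvStep, hn, hi, ha, hg, Bool.false_eq_true, if_false]
  rfl

theorem pv_main (l : List String) : ∀ (t n i a g o : Int),
    l.foldl pvStep (pvD t n i a g o) =
      pvD (t + l.length) (n + pvNB l) (i + pvIB l) (a + pvAB l) (g + pvGB l)
        (o + ((l.length : Int) - pvNB l - pvIB l - pvAB l - pvGB l)) := by
  induction l with
  | nil =>
    intro t n i a g o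
    simp [pvNB, pvIB, pvAB, pvGB, PySem.List.count_eq]
  | cons x xs ih =>
    intro t n i a g o
    by_cases hc1 : x = "rate"
    · subst hc1
      rw [List.foldl_cons, show pvStep (pvD t n i a g o) "rate" = pvD (t + 1) (n + 1) i a g o from rfl, ih]
      apply pvD_congr
      · push_cast [List.length_cons]; ring
      · rw [pvNB_cons_rate]; ring
      · rw [pvIB_cons_ne "rate" xs (by decide) (by decide) (by decide)]
      · rw [pvAB_cons_ne "rate" xs (by decide) (by decide)]
      · rw [pvGB_cons_ne "rate" xs (by decide) (by decide) (by decide)]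
      · rw [pvNB_cons_rate, pvIB_cons_ne "rate" xs (by decide) (by decide) (by decide), pvAB_cons_ne "rate" xs (by decide) (by decide), pvGB_cons_ne "rate" xs (by decide) (by decide) (by decide)]
        push_cast [List.length_cons]; ring
    by_cases hc2 : x = "cl_cmdrate"
    · subst hc2
      rw [List.foldl_cons, show pvStep (pvD t n i a g o) "cl_cmdrate" = pvD (t + 1) (n + 1) i a g o from rfl, ih]
      apply pvD_congr
      · push_cast [List.length_cons]; ring
      · rw [pvNB_cons_cl_cmdrate]; ring
      · rw [pvIB_cons_ne "cl_cmdrate" xs (by decide) (by decide) (by decide)]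
      · rw [pvAB_cons_ne "cl_cmdrate" xs (by decide) (by decide)]
      · rw [pvGB_cons_ne "cl_cmdrate" xs (by decide) (by decide) (by decide)]
      · rw [pvNB_cons_cl_cmdrate, pvIB_cons_ne "cl_cmdrate" xs (by decide) (by decide) (by decide), pvAB_cons_ne "cl_cmdrate" xs (by decide) (by decide), pvGB_cons_ne "cl_cmdrate" xs (by decide) (by decide) (by decide)]
        push_cast [List.length_cons]; ring
    by_cases hc3 : x = "cl_updaterate"
    · subst hc3
      rw [List.foldl_cons, show pvStep (pvD t n i a g o) "cl_updaterate" = pvD (t + 1) (n + 1) i a g o from rfl, ih]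
      apply pvD_congr
      · push_cast [List.length_cons]; ring
      · rw [pvNB_cons_cl_updaterate]; ring
      · rw [pvIB_cons_ne "cl_updaterate" xs (by decide) (by decide) (by decide)]
      · rw [pvAB_cons_ne "cl_updaterate" xs (by decide) (by decide)]
      · rw [pvGB_cons_ne "cl_updaterate" xs (by decide) (by decide) (by decide)]
      · rw [pvNB_cons_cl_updaterate, pvIB_cons_ne "cl_updaterate" xs (by decide) (by decide) (by decide), pvAB_cons_ne "cl_updaterate" xs (by decide) (by decide), pvGB_cons_ne "cl_updaterate" xs (by decide) (by decide) (by decide)]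
        push_cast [List.length_cons]; ring
    by_cases hc4 : x = "cl_interp"
    · subst hc4
      rw [List.foldl_cons, show pvStep (pvD t n i a g o) "cl_interp" = pvD (t + 1) (n + 1) i a g o from rfl, ih]
      apply pvD_congr
      · push_cast [List.length_cons]; ring
      · rw [pvNB_cons_cl_interp]; ring
      · rw [pvIB_cons_ne "cl_interp" xs (by decide) (by decide) (by decide)]
      · rw [pvAB_cons_ne "cl_interp" xs (by decide) (by decide)]
      · rw [pvGB_cons_ne "cl_interp" xs (by decide) (by decide) (by decide)]
      · rw [pvNB_cons_cl_interp, pvIB_cons_ne "cl_interp" xs (by decide) (by decide) (by decide), pvAB_cons_ne "cl_interp" xs (by decide) (by decide), pvGB_cons_ne "cl_interp" xs (by decide) (by decide) (by decide)]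
        push_cast [List.length_cons]; ring
    by_cases hc5 : x = "cl_interp_ratio"
    · subst hc5
      rw [List.foldl_cons, show pvStep (pvD t n i a g o) "cl_interp_ratio" = pvD (t + 1) (n + 1) i a g o from rfl, ih]
      apply pvD_congr
      · push_cast [List.length_cons]; ring
      · rw [pvNB_cons_cl_interp_ratio]; ring
      · rw [pvIB_cons_ne "cl_interp_ratio" xs (by decide) (by decide) (by decide)]
      · rw [pvAB_cons_ne "cl_interp_ratio" xs (by decide) (by decide)]
      · rw [pvGB_cons_ne "cl_interp_ratio" xs (by decide) (by decide) (by decide)]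
      · rw [pvNB_cons_cl_interp_ratio, pvIB_cons_ne "cl_interp_ratio" xs (by decide) (by decide) (by decide), pvAB_cons_ne "cl_interp_ratio" xs (by decide) (by decide), pvGB_cons_ne "cl_interp_ratio" xs (by decide) (by decide) (by decide)]
        push_cast [List.length_cons]; ring
    by_cases hc6 : x = "sensitivity"
    · subst hc6
      rw [List.foldl_cons, show pvStep (pvD t n i a g o) "sensitivity" = pvD (t + 1) n (i + 1) a g o from rfl, ih]
      apply pvD_congr
      · push_cast [List.length_cons]; ring
      · rw [pvNB_cons_ne "sensitivity" xs (by decide) (by decide) (by decide) (by decide) (by decide)]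
      · rw [pvIB_cons_sensitivity]; ring
      · rw [pvAB_cons_ne "sensitivity" xs (by decide) (by decide)]
      · rw [pvGB_cons_ne "sensitivity" xs (by decide) (by decide) (by decide)]
      · rw [pvNB_cons_ne "sensitivity" xs (by decide) (by decide) (by decide) (by decide) (by decide), pvIB_cons_sensitivity, pvAB_cons_ne "sensitivity" xs (by decide) (by decide), pvGB_cons_ne "sensitivity" xs (by decide) (by decide) (by decide)]
        push_cast [List.length_cons]; ring
    by_cases hc7 : x = "m_rawinput"
    · subst hc7
      rw [List.foldl_cons, show pvStep (pvD t n i a g o) "m_rawinput" = pvD (t + 1) n (i + 1) a g o from rfl, ih]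
      apply pvD_congr
      · push_cast [List.length_cons]; ring
      · rw [pvNB_cons_ne "m_rawinput" xs (by decide) (by decide) (by decide) (by decide) (by decide)]
      · rw [pvIB_cons_m_rawinput]; ring
      · rw [pvAB_cons_ne "m_rawinput" xs (by decide) (by decide)]
      · rw [pvGB_cons_ne "m_rawinput" xs (by decide) (by decide) (by decide)]
      · rw [pvNB_cons_ne "m_rawinput" xs (by decide) (by decide) (by decide) (by decide) (by decide), pvIB_cons_m_rawinput, pvAB_cons_ne "m_rawinput" xs (by decide) (by decide), pvGB_cons_ne "m_rawinput" xs (by decide) (by decide) (by decide)]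
        push_cast [List.length_cons]; ring
    by_cases hc8 : x = "m_filter"
    · subst hc8
      rw [List.foldl_cons, show pvStep (pvD t n i a g o) "m_filter" = pvD (t + 1) n (i + 1) a g o from rfl, ih]
      apply pvD_congr
      · push_cast [List.length_cons]; ring
      · rw [pvNB_cons_ne "m_filter" xs (by decide) (by decide) (by decide) (by decide) (by decide)]
      · rw [pvIB_cons_m_filter]; ring
      · rw [pvAB_cons_ne "m_filter" xs (by decide) (by decide)]
      · rw [pvGB_cons_ne "m_filter" xs (by decide) (by decide) (by decide)]
      · rw [pvNB_cons_ne "m_filter" xs (by decide) (by decide) (by decide) (by decide) (by decide), pvIB_cons_m_filter, pvAB_cons_ne "m_filter" xs (by decide) (by decide), pvGB_cons_ne "m_filter" xs (by decide) (by decide) (by decide)]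
        push_cast [List.length_cons]; ring
    by_cases hc9 : x = "volume"
    · subst hc9
      rw [List.foldl_cons, show pvStep (pvD t n i a g o) "volume" = pvD (t + 1) n i (a + 1) g o from rfl, ih]
      apply pvD_congr
      · push_cast [List.length_cons]; ring
      · rw [pvNB_cons_ne "volume" xs (by decide) (by decide) (by decide) (by decide) (by decide)]
      · rw [pvIB_cons_ne "volume" xs (by decide) (by decide) (by decide)]
      · rw [pvAB_cons_volume]; ring
      · rw [pvGB_cons_ne "volume" xs (by decide) (by decide) (by decide)]
      · rw [pvNB_cons_ne "volume" xs (by decide) (by decide) (by decide) (by decide) (by decide), pvIB_cons_ne "volume" xs (by decide) (by decide) (by decide), pvAB_cons_volume, pvGB_cons_ne "volume" xs (by decide) (by decide) (by decide)]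
        push_cast [List.length_cons]; ring
    by_cases hc10 : x = "snd_mixahead"
    · subst hc10
      rw [List.foldl_cons, show pvStep (pvD t n i a g o) "snd_mixahead" = pvD (t + 1) n i (a + 1) g o from rfl, ih]
      apply pvD_congr
      · push_cast [List.length_cons]; ring
      · rw [pvNB_cons_ne "snd_mixahead" xs (by decide) (by decide) (by decide) (by decide) (by decide)]
      · rw [pvIB_cons_ne "snd_mixahead" xs (by decide) (by decide) (by decide)]
      · rw [pvAB_cons_snd_mixahead]; ring
      · rw [pvGB_cons_ne "snd_mixahead" xs (by decide) (by decide) (by decide)]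
      · rw [pvNB_cons_ne "snd_mixahead" xs (by decide) (by decide) (by decide) (by decide) (by decide), pvIB_cons_ne "snd_mixahead" xs (by decide) (by decide) (by decide), pvAB_cons_snd_mixahead, pvGB_cons_ne "snd_mixahead" xs (by decide) (by decide) (by decide)]
        push_cast [List.length_cons]; ring
    by_cases hc11 : x = "fps_max"
    · subst hc11
      rw [List.foldl_cons, show pvStep (pvD t n i a g o) "fps_max" = pvD (t + 1) n i a (g + 1) o from rfl, ih]
      apply pvD_congr
      · push_cast [List.length_cons]; ring
      · rw [pvNB_cons_ne "fps_max" xs (by decide) (by decide) (by decide) (by decide) (by decide)]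
      · rw [pvIB_cons_ne "fps_max" xs (by decide) (by decide) (by decide)]
      · rw [pvAB_cons_ne "fps_max" xs (by decide) (by decide)]
      · rw [pvGB_cons_fps_max]; ring
      · rw [pvNB_cons_ne "fps_max" xs (by decide) (by decide) (by decide) (by decide) (by decide), pvIB_cons_ne "fps_max" xs (by decide) (by decide) (by decide), pvAB_cons_ne "fps_max" xs (by decide) (by decide), pvGB_cons_fps_max]
        push_cast [List.length_cons]; ring
    by_cases hc12 : x = "mat_queue_mode"
    · subst hc12
      rw [List.foldl_cons, show pvStep (pvD t n i a g o) "mat_queue_mode" = pvD (t + 1) n i a (g + 1) o from rfl, ih]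
      apply pvD_congr
      · push_cast [List.length_cons]; ring
      · rw [pvNB_cons_ne "mat_queue_mode" xs (by decide) (by decide) (by decide) (by decide) (by decide)]
      · rw [pvIB_cons_ne "mat_queue_mode" xs (by decide) (by decide) (by decide)]
      · rw [pvAB_cons_ne "mat_queue_mode" xs (by decide) (by decide)]
      · rw [pvGB_cons_mat_queue_mode]; ring
      · rw [pvNB_cons_ne "mat_queue_mode" xs (by decide) (by decide) (by decide) (by decide) (by decide), pvIB_cons_ne "mat_queue_mode" xs (by decide) (by decide) (by decide), pvAB_cons_ne "mat_queue_mode" xs (by decide) (by decide), pvGB_cons_mat_queue_mode]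
        push_cast [List.length_cons]; ring
    by_cases hc13 : x = "cl_forcepreload"
    · subst hc13
      rw [List.foldl_cons, show pvStep (pvD t n i a g o) "cl_forcepreload" = pvD (t + 1) n i a (g + 1) o from rfl, ih]
      apply pvD_congr
      · push_cast [List.length_cons]; ring
      · rw [pvNB_cons_ne "cl_forcepreload" xs (by decide) (by decide) (by decide) (by decide) (by decide)]
      · rw [pvIB_cons_ne "cl_forcepreload" xs (by decide) (by decide) (by decide)]
      · rw [pvAB_cons_ne "cl_forcepreload" xs (by decide) (by decide)]
      · rw [pvGB_cons_cl_forcepreload]; ring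
      · rw [pvNB_cons_ne "cl_forcepreload" xs (by decide) (by decide) (by decide) (by decide) (by decide), pvIB_cons_ne "cl_forcepreload" xs (by decide) (by decide) (by decide), pvAB_cons_ne "cl_forcepreload" xs (by decide) (by decide), pvGB_cons_cl_forcepreload]
        push_cast [List.length_cons]; ring
    rw [List.foldl_cons, pvStep_other t n i a g o x hc1 hc2 hc3 hc4 hc5 hc6 hc7 hc8 hc9 hc10 hc11 hc12 hc13, ih]
    apply pvD_congr
    · push_cast [List.length_cons]; ring
    · rw [pvNB_cons_ne x xs hc1 hc2 hc3 hc4 hc5]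
    · rw [pvIB_cons_ne x xs hc6 hc7 hc8]
    · rw [pvAB_cons_ne x xs hc9 hc10]
    · rw [pvGB_cons_ne x xs hc11 hc12 hc13]
    · rw [pvNB_cons_ne x xs hc1 hc2 hc3 hc4 hc5, pvIB_cons_ne x xs hc6 hc7 hc8, pvAB_cons_ne x xs hc9 hc10, pvGB_cons_ne x xs hc11 hc12 hc13]
      push_cast [List.length_cons]; ring

-- ===== VERDICT (by name: the statement is the Claim_ definition above) =====
theorem get_cfg_stats_spec : Claim_equal_get_cfg_stats := by
  intro cfg_data _
  unfold Spec_get_cfg_stats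
  show (cfg_data.foldl pvStep (pvD 0 0 0 0 0 0)).items = get_cfg_stats_alt cfg_data
  rw [pv_main]
  simp only [get_cfg_stats_alt, pvD, pvNB, pvIB, pvAB, pvGB, zero_add]
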